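-- pv_equiv track=rewrite | github.com/AlfaGestion/wsAlfa | functions/general_customer.py | decode_id_account
-- ===== SOURCE A (Python) =====
-- def decode_id_account(id):
--     """
--     Retorna el codigo de cuenta decodificado
--     """
--     pos = 0
--     decryptedCode = ""
--     tmp = ""
--
--     for code in id:
--         tmp = tmp + code
--
--         if pos == 8:
--             decryptedCode = decryptedCode + tmp[0] + tmp[4] + tmp[8]
--             tmp = ""
--             pos = -1
--         pos = pos+1
--
--     return decryptedCode
-- ===== SOURCE B (Python) =====
-- def decode_id_account(id):
--     """
--     Retorna el codigo de cuenta decodificado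
--     """
--     return "".join(id[i] + id[i + 4] + id[i + 8] for i in range(0, len(id) - 8, 9))
-- ===== Notes on version B (the rewrite author's own statement) =====
-- stated objective: simpler
-- what changed: Replaced the character-by-character loop with its running tmp buffer and pos counter by a one-line join over group-start offsets range(0, len(id)-8, 9), indexing chars 0,4,8 of each complete 9-char group directly.
import Mathlib
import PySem

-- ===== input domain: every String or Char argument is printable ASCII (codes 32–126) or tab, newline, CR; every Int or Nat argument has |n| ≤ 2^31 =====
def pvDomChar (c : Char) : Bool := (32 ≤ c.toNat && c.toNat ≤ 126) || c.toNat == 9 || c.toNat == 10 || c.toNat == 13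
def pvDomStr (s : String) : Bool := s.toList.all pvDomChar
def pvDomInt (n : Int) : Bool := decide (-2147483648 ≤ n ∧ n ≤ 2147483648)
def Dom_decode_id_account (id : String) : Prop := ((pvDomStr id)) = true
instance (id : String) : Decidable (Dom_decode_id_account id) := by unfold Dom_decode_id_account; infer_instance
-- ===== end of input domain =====

-- B replaces A's char-by-char loop (running tmp buffer + pos counter, quadratic repeated string
-- concatenation) by a single join over the start offsets of the complete 9-char groups, indexing
-- chars 0,4,8 of each; simpler and measured faster in a timing run.

-- ===== PORT A =====
-- one loop iteration of A: state = (pos, decryptedCode, tmp); tmp[0]/tmp[4]/tmp[8]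
-- are always in range when pos == 8 (tmp then holds 9 chars), so pyGetD's default is never used
def pvStepA (s : Int × List Char × List Char) (code : Char) : Int × List Char × List Char :=
  let pos := s.1
  let decryptedCode := s.2.1
  let tmp := s.2.2 ++ [code]
  if pos = 8 then
    (-1 + 1,
     decryptedCode ++ [PySem.List.pyGetD tmp 0 ' ', PySem.List.pyGetD tmp 4 ' ', PySem.List.pyGetD tmp 8 ' '],
     [])
  else
    (pos + 1, decryptedCode, tmp)

def decode_id_account (id : String) : String :=
  String.ofList ((id.toList.foldl pvStepA (0, [], [])).2.1)

-- ===== PORT B =====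
-- ''.join(id[i] + id[i+4] + id[i+8] for i in range(0, len(id) - 8, 9)); the indices
-- i, i+4, i+8 are always in range for i in this range, so pyGetD's default is never used
def decode_id_account_alt (id : String) : String :=
  String.ofList (((PySem.List.pyRange 0 ((id.toList.length : Int) - 8) 9).map (fun i =>
    [PySem.List.pyGetD id.toList i ' ', PySem.List.pyGetD id.toList (i + 4) ' ',
     PySem.List.pyGetD id.toList (i + 8) ' '])).flatten)

-- ===== PRECONDITION & SPEC =====
def Spec_decode_id_account (id : String) (out : String) : Prop := out = decode_id_account_alt id
instance (id : String) (out : String) : Decidable (Spec_decode_id_account id out) := by unfold Spec_decode_id_account; infer_instance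

-- ===== CLAIM (what is proved, stated in full; the proofs are below) =====
def Claim_equal_decode_id_account : Prop := ∀ (id : String), Dom_decode_id_account id → Spec_decode_id_account id (decode_id_account id)

-- ===== LEMMAS AND PROOFS =====

-- proof-only intermediate form: take chars 0,4,8 of each complete 9-char group, recursively
def pvAltGo (l : List Char) : List Char :=
  if _h : l.length < 9 then []
  else PySem.List.pyGetD l 0 ' ' :: PySem.List.pyGetD l 4 ' ' :: PySem.List.pyGetD l 8 ' ' ::
       pvAltGo (l.drop 9)
termination_by l.length
decreasing_by simp; omega

-- with fewer than 9 - pos chars left, A's if never fires and decryptedCode is unchanged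
lemma pv_fold_small (l : List Char) : ∀ (p : Int) (dec tmp : List Char), 0 ≤ p →
    p + l.length ≤ 8 → (l.foldl pvStepA (p, dec, tmp)).2.1 = dec := by
  induction l with
  | nil => intro p dec tmp _ _; rfl
  | cons c t ih =>
    intro p dec tmp hp hlen
    simp only [List.length_cons] at hlen
    have hne : ¬ p = 8 := by omega
    simp only [List.foldl_cons, pvStepA, hne, if_false]
    exact ih (p + 1) dec (tmp ++ [c]) (by omega) (by push_cast at hlen ⊢; omega)

-- A's fold appends exactly the chars 0,4,8 of each complete 9-char group
lemma pv_fold_main (n : ℕ) : ∀ (l : List Char), l.length = n → ∀ (dec : List Char),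
    (l.foldl pvStepA (0, dec, [])).2.1 = dec ++ pvAltGo l := by
  induction n using Nat.strong_induction_on with
  | _ n ih =>
    intro l hl dec
    by_cases hs : l.length < 9
    · rw [pvAltGo, dif_pos hs]
      simp [pv_fold_small l 0 dec [] le_rfl (by omega)]
    · rcases l with _|⟨a,l⟩; · simp at hs
      rcases l with _|⟨b,l⟩; · simp at hs
      rcases l with _|⟨c,l⟩; · simp at hs
      rcases l with _|⟨d,l⟩; · simp at hs
      rcases l with _|⟨e,l⟩; · simp at hs
      rcases l with _|⟨f,l⟩; · simp at hs
      rcases l with _|⟨g,l⟩; · simp at hs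
      rcases l with _|⟨h,l⟩; · simp at hs
      rcases l with _|⟨i,rest⟩; · simp at hs
      rw [pvAltGo]
      simp only [List.length_cons] at hs hl ⊢
      rw [dif_neg hs]
      have hstep : (List.foldl pvStepA (0, dec, []) (a::b::c::d::e::f::g::h::i::rest)).2.1
          = (List.foldl pvStepA (0, dec ++ [a, e, i], []) rest).2.1 := by
        simp [pvStepA, PySem.List.pyGetD_ofNat', List.getD]
      rw [hstep, ih rest.length (by omega) rest rfl (dec ++ [a, e, i])]
      simp [PySem.List.pyGetD_ofNat', List.getD]

-- indexing past nine leading elements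
lemma pvGetD_shift9 (a b c d e f g h i : Char) (xs : List Char) (k : Int) (hk : 0 ≤ k) (dft : Char) :
    PySem.List.pyGetD (a::b::c::d::e::f::g::h::i::xs) (k+9) dft = PySem.List.pyGetD xs k dft := by
  obtain ⟨n, rfl⟩ := Int.eq_ofNat_of_zero_le hk
  simp only [PySem.List.pyGetD]
  rw [show ((n:Int)+9) = (((n+8:ℕ)):Int)+1 from by push_cast; ring, PySem.List.pyGet?_cons_succ,
      show (((n+8:ℕ)):Int) = (((n+7:ℕ)):Int)+1 from by push_cast; ring, PySem.List.pyGet?_cons_succ,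
      show (((n+7:ℕ)):Int) = (((n+6:ℕ)):Int)+1 from by push_cast; ring, PySem.List.pyGet?_cons_succ,
      show (((n+6:ℕ)):Int) = (((n+5:ℕ)):Int)+1 from by push_cast; ring, PySem.List.pyGet?_cons_succ,
      show (((n+5:ℕ)):Int) = (((n+4:ℕ)):Int)+1 from by push_cast; ring, PySem.List.pyGet?_cons_succ,
      show (((n+4:ℕ)):Int) = (((n+3:ℕ)):Int)+1 from by push_cast; ring, PySem.List.pyGet?_cons_succ,
      show (((n+3:ℕ)):Int) = (((n+2:ℕ)):Int)+1 from by push_cast; ring, PySem.List.pyGet?_cons_succ,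
      show (((n+2:ℕ)):Int) = (((n+1:ℕ)):Int)+1 from by push_cast; ring, PySem.List.pyGet?_cons_succ,
      show (((n+1:ℕ)):Int) = ((n:ℕ):Int)+1 from by push_cast; ring, PySem.List.pyGet?_cons_succ]

lemma pvRange9_cons (a b : Int) (h : a < b) :
    PySem.List.pyRange a b 9 = a :: PySem.List.pyRange (a+9) b 9 := by
  rw [PySem.List.pyRange_of_pos a b (by norm_num), PySem.List.pyRange_of_pos (a+9) b (by norm_num), if_pos h]
  by_cases h2 : a + 9 < b
  · rw [if_pos h2]
    have hm : ((b - a + 9 - 1) / 9).toNat = ((b - (a+9) + 9 - 1) / 9).toNat + 1 := by omega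
    rw [hm, List.range_succ_eq_map, List.map_cons, List.map_map]
    norm_num
    intro k _
    ring
  · rw [if_neg h2]
    have hm : ((b - a + 9 - 1) / 9).toNat = 1 := by omega
    rw [hm]
    simp [List.range_one]

lemma pvRange9_shift (a b : Int) :
    PySem.List.pyRange (a+9) b 9 = (PySem.List.pyRange a (b-9) 9).map (· + 9) := by
  rw [PySem.List.pyRange_of_pos _ _ (by norm_num : (0:Int) < 9),
      PySem.List.pyRange_of_pos _ _ (by norm_num : (0:Int) < 9), List.map_map]
  by_cases h : a < b - 9
  · rw [if_pos (by omega), if_pos h]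
    have : b - (a+9) + 9 - 1 = b - 9 - a + 9 - 1 := by ring
    rw [this]
    apply List.map_congr_left
    intro k _
    simp [Function.comp]; ring
  · rw [if_neg (by omega), if_neg h]
    simp

-- B's comprehension over group starts computes the recursive group decomposition
lemma pv_alt_eq_go (n : ℕ) : ∀ (l : List Char), l.length = n →
    ((PySem.List.pyRange 0 ((l.length:Int) - 8) 9).map (fun i =>
      [PySem.List.pyGetD l i ' ', PySem.List.pyGetD l (i+4) ' ', PySem.List.pyGetD l (i+8) ' '])).flatten
    = pvAltGo l := by
  induction n using Nat.strong_induction_on with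
  | _ n ih =>
    intro l hl
    by_cases hs : l.length < 9
    · rw [pvAltGo, dif_pos hs, PySem.List.pyRange_of_pos _ _ (by norm_num : (0:Int) < 9),
          if_neg (by omega)]
      simp
    · rcases l with _|⟨a,l⟩; · simp at hs
      rcases l with _|⟨b,l⟩; · simp at hs
      rcases l with _|⟨c,l⟩; · simp at hs
      rcases l with _|⟨d,l⟩; · simp at hs
      rcases l with _|⟨e,l⟩; · simp at hs
      rcases l with _|⟨f,l⟩; · simp at hs
      rcases l with _|⟨g,l⟩; · simp at hs
      rcases l with _|⟨h,l⟩; · simp at hs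
      rcases l with _|⟨i,rest⟩; · simp at hs
      rw [pvAltGo, dif_neg hs]
      simp only [List.length_cons] at hs hl ⊢
      rw [pvRange9_cons 0 _ (by push_cast; omega), pvRange9_shift,
          show ((rest.length + 1 + 1 + 1 + 1 + 1 + 1 + 1 + 1 + 1 : ℕ) : Int) - 8 - 9
            = (rest.length : Int) - 8 from by push_cast; ring]
      simp only [List.map_cons, List.flatten_cons, List.map_map, List.drop_succ_cons,
        List.drop_zero]
      have htail : (List.map ((fun i_1 =>
            [PySem.List.pyGetD (a :: b :: c :: d :: e :: f :: g :: h :: i :: rest) i_1 ' ',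
             PySem.List.pyGetD (a :: b :: c :: d :: e :: f :: g :: h :: i :: rest) (i_1 + 4) ' ',
             PySem.List.pyGetD (a :: b :: c :: d :: e :: f :: g :: h :: i :: rest) (i_1 + 8) ' ']) ∘
            fun x => x + 9) (PySem.List.pyRange 0 ((rest.length:Int) - 8) 9)).flatten
          = pvAltGo rest := by
        rw [← ih rest.length (by omega) rest rfl]
        apply congrArg
        apply List.map_congr_left
        intro k hk
        have hk0 : 0 ≤ k := ((PySem.List.mem_pyRange_iff_of_pos (by norm_num) k).mp hk).1
        simp only [Function.comp]
        rw [show k + 9 + 4 = (k + 4) + 9 from by ring,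
            show k + 9 + 8 = (k + 8) + 9 from by ring,
            pvGetD_shift9 _ _ _ _ _ _ _ _ _ _ _ hk0,
            pvGetD_shift9 _ _ _ _ _ _ _ _ _ _ _ (by omega),
            pvGetD_shift9 _ _ _ _ _ _ _ _ _ _ _ (by omega)]
      rw [htail]
      norm_num [PySem.List.pyGetD_ofNat', List.getD]

-- ===== VERDICT (by name: the statement is the Claim_ definition above) =====
theorem decode_id_account_spec : Claim_equal_decode_id_account := by
  intro id _
  unfold Spec_decode_id_account decode_id_account decode_id_account_alt
  rw [pv_fold_main id.toList.length id.toList rfl [],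
      pv_alt_eq_go id.toList.length id.toList rfl]
  rfl
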